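-- pv_equiv track=rewrite | github.com/skv-analyst/education | leetcode/08-hashset.py | solution
-- ===== SOURCE A (Python) =====
-- def solution(nums):
--     # Time: O(n)
--     # Space: O(n)
--
--     seen = set()
--     ans = False
--
--     for i in range(len(nums) - 1):
--         # sum_now = nums[i - 1] + nums[i]
--         sum_now = nums[i] + nums[i + 1]
--         if sum_now in seen:
--             ans = True
--             break
--         seen.add(sum_now)
--
--     return ans
-- ===== SOURCE B (Python) =====
-- def solution(nums):
--     # Brute force: compare every adjacent-pair sum against every earlier one.
--     for j in range(len(nums) - 1):
--         for i in range(j):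
--             if nums[i] + nums[i + 1] == nums[j] + nums[j + 1]:
--                 return True
--     return False
-- ===== Notes on version B (the rewrite author's own statement) =====
-- stated objective: alternative
-- what changed: A streams once over the list with an incremental seen-set and a break; B drops the set entirely and decides duplicate-ness by a quadratic nested index scan, comparing each adjacent sum against every earlier adjacent sum directly.
import Mathlib
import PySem

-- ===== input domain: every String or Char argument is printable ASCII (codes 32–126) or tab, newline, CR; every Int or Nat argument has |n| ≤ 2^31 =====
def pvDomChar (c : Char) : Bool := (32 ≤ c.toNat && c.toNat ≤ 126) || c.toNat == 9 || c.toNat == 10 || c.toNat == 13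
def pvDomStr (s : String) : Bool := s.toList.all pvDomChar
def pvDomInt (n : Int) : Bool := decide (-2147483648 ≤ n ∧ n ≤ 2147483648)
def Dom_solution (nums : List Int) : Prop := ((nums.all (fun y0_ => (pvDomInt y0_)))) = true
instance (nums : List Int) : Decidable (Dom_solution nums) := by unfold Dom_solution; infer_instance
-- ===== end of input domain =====

-- B replaces A's single streaming pass with an incremental seen-set and break by a
-- set-free quadratic nested scan comparing each adjacent sum with every earlier one (objective: alternative).


-- sum_now = nums[i] + nums[i+1], the adjacent sum both sources read (indices always in bounds)
def sAt (nums : List Int) (i : Int) : Int :=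
  PySem.List.pyGetD nums i 0 + PySem.List.pyGetD nums (i + 1) 0

-- ===== PORT A =====
-- A's loop: for i in range(len(nums)-1): sum_now = nums[i] + nums[i+1]; break on repeat.
def solutionGo (nums : List Int) (idxs : List Int) (seen : PySem.Set Int) (ans : Bool) : Bool :=
  match idxs with
  | [] => ans
  | i :: rest =>
    let sumNow := sAt nums i
    if PySem.Set.contains seen sumNow then true
    else solutionGo nums rest (PySem.Set.add seen sumNow) ans

def solution (nums : List Int) : Bool :=
  solutionGo nums (PySem.List.pyRange 0 ((nums.length : Int) - 1) 1) PySem.Set.empty false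

-- ===== PORT B =====
-- B's nested loops: for j in range(len(nums)-1): for i in range(j): compare the two sums.
def altInner (nums : List Int) (j : Int) (is : List Int) : Bool :=
  match is with
  | [] => false
  | i :: rest =>
    if sAt nums i == sAt nums j then true else altInner nums j rest

def altOuter (nums : List Int) (js : List Int) : Bool :=
  match js with
  | [] => false
  | j :: rest =>
    if altInner nums j (PySem.List.pyRange 0 j 1) then true else altOuter nums rest

def solution_alt (nums : List Int) : Bool :=
  altOuter nums (PySem.List.pyRange 0 ((nums.length : Int) - 1) 1)

-- ===== PRECONDITION & SPEC =====
def Spec_solution (nums : List Int) (out : Bool) : Prop := out = solution_alt nums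
instance (nums : List Int) (out : Bool) : Decidable (Spec_solution nums out) := by unfold Spec_solution; infer_instance

-- ===== CLAIM (what is proved, stated in full; the proofs are below) =====
def Claim_equal_solution : Prop := ∀ (nums : List Int), Dom_solution nums → Spec_solution nums (solution nums)

-- ===== LEMMAS AND PROOFS =====

-- A's loop as a generic duplicate stream over the list of sums it will meet
def dupStream (l : List Int) (seen : PySem.Set Int) : Bool :=
  match l with
  | [] => false
  | x :: rest =>
    if PySem.Set.contains seen x then true else dupStream rest (PySem.Set.add seen x)

theorem solutionGo_eq_dupStream (nums : List Int) (idxs : List Int) (seen : PySem.Set Int) :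
    solutionGo nums idxs seen false = dupStream (idxs.map (sAt nums)) seen := by
  induction idxs generalizing seen with
  | nil => rfl
  | cons i rest ih => simp [solutionGo, dupStream, ih]

theorem dupStream_iff (l : List Int) (seen : PySem.Set Int) :
    dupStream l seen = true ↔ (∃ x ∈ l, x ∈ seen) ∨ ¬ l.Nodup := by
  induction l generalizing seen with
  | nil => simp [dupStream]
  | cons x rest ih =>
    by_cases hm : x ∈ seen
    · simp [dupStream, hm]
    · have hc : PySem.Set.contains seen x = false := by
        rw [← Bool.not_eq_true, PySem.Set.contains_iff]; exact hm
      rw [show dupStream (x :: rest) seen = dupStream rest (PySem.Set.add seen x) by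
            simp [dupStream, hm], ih]
      simp only [List.mem_cons, List.nodup_cons, PySem.Set.mem_add, not_and_or]
      constructor
      · rintro (⟨y, hy, hseen | rfl⟩ | hnd)
        · exact Or.inl ⟨y, Or.inr hy, hseen⟩
        · exact Or.inr (Or.inl (by simpa using hy))
        · exact Or.inr (Or.inr hnd)
      · rintro (⟨y, hy | hy, hseen⟩ | hx | hnd)
        · exact absurd (hy ▸ hseen) hm
        · exact Or.inl ⟨y, hy, Or.inl hseen⟩
        · exact Or.inl ⟨x, not_not.mp hx, Or.inr rfl⟩
        · exact Or.inr hnd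

theorem altInner_iff (nums : List Int) (j : Int) (is : List Int) :
    altInner nums j is = true ↔ ∃ i ∈ is, sAt nums i = sAt nums j := by
  induction is with
  | nil => simp [altInner]
  | cons i rest ih =>
    by_cases h : sAt nums i = sAt nums j
    · simp [altInner, h]
    · simp [altInner, h, ih]

theorem altOuter_iff (nums : List Int) (js : List Int) :
    altOuter nums js = true ↔ ∃ j ∈ js, ∃ i, 0 ≤ i ∧ i < j ∧ sAt nums i = sAt nums j := by
  induction js with
  | nil => simp [altOuter]
  | cons j rest ih =>
    by_cases h : altInner nums j (PySem.List.pyRange 0 j 1) = true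
    · rw [altInner_iff] at h
      obtain ⟨i, hi, heq⟩ := h
      rw [PySem.List.mem_pyRange_one] at hi
      simp only [altOuter, altInner_iff]
      constructor
      · intro _; exact ⟨j, List.mem_cons_self, i, hi.1, hi.2, heq⟩
      · intro _
        rw [if_pos]
        · exact ⟨i, by rw [PySem.List.mem_pyRange_one]; exact hi, heq⟩
    · rw [show altOuter nums (j :: rest) = altOuter nums rest by simp [altOuter, h], ih]
      constructor
      · rintro ⟨j', hj', w⟩; exact ⟨j', List.mem_cons_of_mem _ hj', w⟩
      · rintro ⟨j', hj', i, h0, hij, heq⟩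
        rcases List.mem_cons.mp hj' with rfl | hj'
        · exact absurd ((altInner_iff _ _ _).mpr
            ⟨i, (PySem.List.mem_pyRange_one).mpr ⟨h0, hij⟩, heq⟩) h
        · exact ⟨j', hj', i, h0, hij, heq⟩

-- ¬Nodup of the mapped range ↔ a pair of distinct indices with equal sums
theorem not_nodup_iff (nums : List Int) (m : Int) :
    (¬ ((PySem.List.pyRange 0 m 1).map (sAt nums)).Nodup) ↔
      ∃ j, 0 ≤ j ∧ j < m ∧ ∃ i, 0 ≤ i ∧ i < j ∧ sAt nums i = sAt nums j := by
  rw [List.Nodup, List.pairwise_iff_getElem]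
  simp only [not_forall]
  constructor
  · rintro ⟨a, b, ha, hb, hab, hne⟩
    have hlen : ((PySem.List.pyRange 0 m 1).map (sAt nums)).length = (m - 0).toNat := by
      simp [PySem.List.length_pyRange_one]
    rw [hlen] at ha hb
    have hbm : (b : Int) < m := by omega
    refine ⟨(b : Int), by omega, hbm, (a : Int), by omega, by exact_mod_cast hab, ?_⟩
    have : sAt nums ((0 : Int) + a) = sAt nums ((0 : Int) + b) := by
      have h1 : ((PySem.List.pyRange 0 m 1).map (sAt nums))[a] = sAt nums (0 + (a : Int)) := by
        rw [List.getElem_map, PySem.List.getElem_pyRange_one]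
      have h2 : ((PySem.List.pyRange 0 m 1).map (sAt nums))[b] = sAt nums (0 + (b : Int)) := by
        rw [List.getElem_map, PySem.List.getElem_pyRange_one]
      rw [← h1, ← h2]
      exact not_not.mp hne
    simpa using this
  · rintro ⟨j, hj0, hjm, i, hi0, hij, heq⟩
    have hlen : ((PySem.List.pyRange 0 m 1).map (sAt nums)).length = (m - 0).toNat := by
      simp [PySem.List.length_pyRange_one]
    refine ⟨i.toNat, j.toNat, by rw [hlen]; omega, by rw [hlen]; omega, by omega, ?_⟩
    rw [not_not, List.getElem_map, List.getElem_map,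
      PySem.List.getElem_pyRange_one, PySem.List.getElem_pyRange_one]
    simpa [hi0, hj0] using heq

-- ===== VERDICT (by name: the statement is the Claim_ definition above) =====
theorem solution_spec : Claim_equal_solution := by
  intro nums _
  show solution nums = solution_alt nums
  unfold solution solution_alt
  rw [solutionGo_eq_dupStream]
  rw [Bool.eq_iff_iff, dupStream_iff, altOuter_iff]
  rw [not_nodup_iff]
  constructor
  · rintro (⟨x, _, hx⟩ | ⟨j, hj0, hjm, w⟩)
    · exact absurd hx (by simp [PySem.Set.empty])
    · exact ⟨j, (PySem.List.mem_pyRange_one).mpr ⟨hj0, hjm⟩, w⟩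
  · rintro ⟨j, hj, w⟩
    rw [PySem.List.mem_pyRange_one] at hj
    exact Or.inr ⟨j, hj.1, hj.2, w⟩
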